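-- pv_equiv track=rewrite | github.com/nyayat/Cours-DL-info-jap | L2/[S4] EA2/TP/TP2/tp2_ex1.py | fibo_3_bits
-- ===== SOURCE A (Python) =====
-- def nbOfBits(i) :
--   res = 1
--   while (2**res <= i):
--     res +=1
--   return res # À COMPLÉTER
--
-- def fibo_3_bits(n) :
--   if n <= 0 : return 0, 0
--   previous, last = 0, 1
--   ops = 0
--   for i in range(1, n) :
--     previous, last = last, previous + last
--     ops += nbOfBits(last)
--   return last, ops
-- ===== SOURCE B (Python) =====
-- def fibo_3_bits(n):
--     if n <= 0:
--         return 0, 0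
--     # Transposed double counting: instead of summing bit_length(fib(k)) per element,
--     # record cross[j] = first k >= 2 with fib(k) >= 2**j (fib is nondecreasing), then
--     # total bits = sum over bit positions j of (n + 1 - cross[j]).
--     a, b = 0, 1
--     cross = []
--     pw = 1  # 2 ** len(cross)
--     for k in range(2, n + 1):
--         a, b = b, a + b
--         while pw <= b:
--             cross.append(k)
--             pw += pw
--     ops = sum(n + 1 - k for k in cross)
--     return b, ops
-- ===== Notes on version B (the rewrite author's own statement) =====
-- stated objective: faster
-- what changed: Replaces per-element bit counting (A calls a while-loop nbOfBits recomputing 2**res for every fib value) by a transposed double count: record, while building the fib pair, the first index k at which fib(k) reaches each power of two (amortized O(1) threshold advances over the whole run), then obtain the total as a closed-form sum over bit positions, sum(n+1-cross[j]).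
import Mathlib
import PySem

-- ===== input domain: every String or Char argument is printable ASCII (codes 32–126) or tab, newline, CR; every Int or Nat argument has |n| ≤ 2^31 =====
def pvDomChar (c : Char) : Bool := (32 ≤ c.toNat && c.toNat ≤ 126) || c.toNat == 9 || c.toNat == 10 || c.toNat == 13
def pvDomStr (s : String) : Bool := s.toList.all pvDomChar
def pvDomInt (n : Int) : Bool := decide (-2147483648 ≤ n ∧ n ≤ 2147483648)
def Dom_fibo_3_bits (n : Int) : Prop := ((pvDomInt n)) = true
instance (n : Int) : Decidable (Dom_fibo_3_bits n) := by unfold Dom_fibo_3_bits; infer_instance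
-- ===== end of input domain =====

-- B replaces A's per-element bit counting by a transposed double count (first-crossing index of
-- each power of two, then a closed-form sum over bit positions); objective: faster.

-- ===== PORT A =====
-- while (2**res <= i): res += 1   (terminates: res < 2^res ≤ i)
def nbOfBitsAux (i : Int) (res : Nat) : Nat :=
  if (2:Int)^res ≤ i then nbOfBitsAux i (res+1) else res
termination_by i.toNat + 1 - res
decreasing_by
  have h1 : (res : Int) < (2:Int)^res := by
    have := Nat.lt_two_pow_self (n := res)
    exact_mod_cast this
  omega

def nbOfBits (i : Int) : Int := (nbOfBitsAux i 1 : Int)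

def fibo_3_bits (n : Int) : Int × Int :=
  if n ≤ 0 then (0, 0)
  else
    let st := (PySem.List.pyRange 1 n 1).foldl
      (fun (s : Int × Int × Int) _ =>
        (s.2.1, s.1 + s.2.1, s.2.2 + nbOfBits (s.1 + s.2.1)))
      (0, 1, 0)
    (st.2.1, st.2.2)

-- ===== PORT B =====
-- while pw <= b: cross.append(k); pw += pw   (the '1 ≤ pw' conjunct only makes the loop total;
-- pw is always a power of two when called, so it never changes the result)
def crossLoop (b k : Int) (cross : List Int) (pw : Int) : List Int × Int :=
  if 1 ≤ pw ∧ pw ≤ b then crossLoop b k (cross ++ [k]) (pw + pw) else (cross, pw)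
termination_by (b + 1 - pw).toNat
decreasing_by omega

-- one iteration of B's for-loop: a, b = b, a+b, then the while loop on the new b
def stepB (st : Int × Int × List Int × Int) (k : Int) : Int × Int × List Int × Int :=
  let b' := st.1 + st.2.1
  let cp := crossLoop b' k st.2.2.1 st.2.2.2
  (st.2.1, b', cp.1, cp.2)

def fibo_3_bits_alt (n : Int) : Int × Int :=
  if n ≤ 0 then (0, 0)
  else
    let st := (PySem.List.pyRange 2 (n+1) 1).foldl stepB (0, 1, ([] : List Int), 1)
    let ops := st.2.2.1.foldl (fun (acc : Int) k => acc + (n + 1 - k)) 0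
    (st.2.1, ops)

-- ===== PRECONDITION & SPEC =====
def Spec_fibo_3_bits (n : Int) (out : Int × Int) : Prop := out = fibo_3_bits_alt n
instance (n : Int) (out : Int × Int) : Decidable (Spec_fibo_3_bits n out) := by unfold Spec_fibo_3_bits; infer_instance

-- ===== CLAIM (what is proved, stated in full; the proofs are below) =====
def Claim_equal_fibo_3_bits : Prop := ∀ (n : Int), Dom_fibo_3_bits n → Spec_fibo_3_bits n (fibo_3_bits n)

-- ===== LEMMAS AND PROOFS =====

def fib : Nat → Int
  | 0 => 0
  | 1 => 1
  | (k+2) => fib k + fib (k+1)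

-- S m = total bit lengths of fib(2)..fib(m)
def S : Nat → Int
  | 0 => 0
  | 1 => 0
  | (m+2) => S (m+1) + (Nat.size (fib (m+2)).toNat : Int)

theorem fib_nonneg : ∀ m, 0 ≤ fib m := by
  intro m
  induction m using Nat.strong_induction_on with
  | _ m ih =>
    match m with
    | 0 => simp [fib]
    | 1 => simp [fib]
    | (m+2) =>
      have h1 := ih m (by omega)
      have h2 := ih (m+1) (by omega)
      simp [fib]; omega

theorem fib_pos : ∀ m, 1 ≤ m → 1 ≤ fib m := by
  intro m hm
  match m, hm with
  | 1, _ => simp [fib]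
  | (m+2), _ =>
    have h1 := fib_nonneg m
    have h2 := fib_pos (m+1) (by omega)
    simp [fib]; omega

theorem fib_succ (m : Nat) (hm : 1 ≤ m) : fib (m+1) = fib (m-1) + fib m := by
  obtain ⟨j, rfl⟩ : ∃ j, m = j + 1 := ⟨m - 1, by omega⟩
  simp [fib]

theorem S_succ (m : Nat) (hm : 1 ≤ m) :
    S (m+1) = S m + (Nat.size (fib (m+1)).toNat : Int) := by
  obtain ⟨j, rfl⟩ : ∃ j, m = j + 1 := ⟨m - 1, by omega⟩
  simp [S]

theorem nbOfBitsAux_eq (i : Int) (res : Nat) :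
    nbOfBitsAux i res = max res (Nat.size i.toNat) := by
  fun_induction nbOfBitsAux i res with
  | case1 res h ih =>
    rw [ih]
    have hle : (2:Nat)^res ≤ i.toNat := by
      have h0 : (0:Int) ≤ i := le_trans (by positivity) h
      have : ((2:Nat)^res : Int) ≤ i := by push_cast; exact h
      omega
    have : ¬ Nat.size i.toNat ≤ res := by
      rw [Nat.size_le]; omega
    omega
  | case2 res h =>
    have hlt : i.toNat < 2^res := by
      by_cases h0 : (0:Int) ≤ i
      · have : i < ((2:Nat)^res : Int) := by push_cast; omega
        omega
      · have : i.toNat = 0 := by omega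
        rw [this]; positivity
    have : Nat.size i.toNat ≤ res := Nat.size_le.mpr hlt
    omega

theorem nbOfBits_eq_size (i : Int) (h : 1 ≤ i) : nbOfBits i = (Nat.size i.toNat : Int) := by
  unfold nbOfBits
  rw [nbOfBitsAux_eq]
  have : 0 < i.toNat := by omega
  have : 1 ≤ Nat.size i.toNat := Nat.size_pos.mpr this
  congr 1
  omega

-- A's loop computes (fib(m-1), fib m, S m)
theorem loopA (m : Nat) (hm : 1 ≤ m) :
    (PySem.List.pyRange 1 (m : Int) 1).foldl
      (fun (s : Int × Int × Int) _ =>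
        (s.2.1, s.1 + s.2.1, s.2.2 + nbOfBits (s.1 + s.2.1)))
      (0, 1, 0)
    = (fib (m-1), fib m, S m) := by
  induction m, hm using Nat.le_induction with
  | base =>
    rw [PySem.List.pyRange_one_eq_nil (by norm_num)]
    simp [fib, S]
  | succ m hm ih =>
    have hcast : ((m+1 : Nat) : Int) = (m : Int) + 1 := by push_cast; ring
    rw [hcast, PySem.List.pyRange_one_succ_right (by exact_mod_cast hm), List.foldl_append, ih]
    simp only [List.foldl_cons, List.foldl_nil]
    have hfib : fib (m-1) + fib m = fib (m+1) := (fib_succ m hm).symm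
    have hpos : 1 ≤ fib (m+1) := fib_pos (m+1) (by omega)
    rw [hfib, nbOfBits_eq_size _ hpos, ← S_succ m hm]
    have h4 : m + 1 - 1 = m := by omega
    rw [h4]

-- the while loop advances pw = 2^L to 2^(max L (size b)) and appends k that many times
theorem crossLoop_eq (b k : Int) :
    ∀ (d L : Nat), Nat.size b.toNat ≤ L + d → ∀ (cross : List Int),
      crossLoop b k cross ((2:Int)^L) =
        (cross ++ List.replicate (max L (Nat.size b.toNat) - L) k,
         (2:Int)^(max L (Nat.size b.toNat))) := by
  intro d
  induction d with
  | zero =>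
    intro L hL cross
    rw [crossLoop, if_neg]
    · rw [Nat.max_eq_left (by omega)]
      simp
    · rintro ⟨-, hle⟩
      have hb1 : (1:Int) ≤ b := le_trans (one_le_pow₀ (by norm_num)) hle
      have : (2:Nat)^L ≤ b.toNat := by
        have : ((2:Nat)^L : Int) ≤ b := by push_cast; exact hle
        omega
      have : L < Nat.size b.toNat := Nat.lt_size.mpr this
      omega
  | succ d ih =>
    intro L hL cross
    by_cases hle : (2:Int)^L ≤ b
    · have hb1 : (1:Int) ≤ b := le_trans (one_le_pow₀ (by norm_num)) hle
      have hLlt : L < Nat.size b.toNat := by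
        apply Nat.lt_size.mpr
        have : ((2:Nat)^L : Int) ≤ b := by push_cast; exact hle
        omega
      rw [crossLoop, if_pos ⟨one_le_pow₀ (by norm_num), hle⟩]
      have hpw : (2:Int)^L + (2:Int)^L = (2:Int)^(L+1) := by ring
      rw [hpw, ih (L+1) (by omega) (cross ++ [k])]
      have hmax1 : max L (Nat.size b.toNat) = Nat.size b.toNat := by omega
      have hmax2 : max (L+1) (Nat.size b.toNat) = Nat.size b.toNat := by omega
      rw [hmax1, hmax2, List.append_assoc]
      congr 2
      have : Nat.size b.toNat - L = (Nat.size b.toNat - (L+1)) + 1 := by omega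
      rw [this, List.replicate_succ]
      rfl
    · rw [crossLoop, if_neg (by rintro ⟨-, h⟩; exact hle h)]
      have hsz : Nat.size b.toNat ≤ L := by
        rw [Nat.size_le]
        by_cases h0 : (0:Int) ≤ b
        · have : b < ((2:Nat)^L : Int) := by push_cast; omega
          omega
        · have : b.toNat = 0 := by omega
          rw [this]; positivity
      rw [Nat.max_eq_left hsz]
      simp

-- closed-form for B's final reduction
theorem foldl_sub_sum (N : Int) :
    ∀ (l : List Int) (acc : Int),
      l.foldl (fun a x => a + (N - x)) acc = acc + N * l.length - l.sum := by
  intro l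
  induction l with
  | nil => intro acc; simp
  | cons x t ih =>
    intro acc
    simp only [List.foldl_cons, List.sum_cons, List.length_cons, ih]
    push_cast
    ring

-- B's loop invariant: state = (fib(K-1), fib K, cross, 2^size(fib K)) with the double-count equation
theorem loopB (m : Nat) (hm : 2 ≤ m) :
    ∃ cross : List Int,
      (PySem.List.pyRange 2 ((m : Int) + 1) 1).foldl stepB (0, 1, ([] : List Int), 1)
        = (fib (m-1), fib m, cross, (2:Int)^(Nat.size (fib m).toNat))
      ∧ cross.length = Nat.size (fib m).toNat
      ∧ ((m : Int) + 1) * cross.length - cross.sum = S m := by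
  induction m, hm using Nat.le_induction with
  | base =>
    have hc : crossLoop 1 2 [] 1 = ([2], 2) := by
      rw [crossLoop, if_pos (by norm_num), crossLoop, if_neg (by norm_num)]
      norm_num
    refine ⟨[2], ?_, ?_, ?_⟩
    · rw [show ((2:Nat):Int) + 1 = (2:Int) + 1 from by norm_num,
          PySem.List.pyRange_one_succ_right (by norm_num),
          PySem.List.pyRange_one_eq_nil (by norm_num)]
      simp only [List.nil_append, List.foldl_cons, List.foldl_nil]
      simp only [stepB]
      norm_num [hc, fib, Nat.size_one]
    · norm_num [fib, Nat.size_one]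
    · norm_num [fib, S, Nat.size_one]
  | succ m hm ih =>
    obtain ⟨cross, hst, hlen, hsum⟩ := ih
    have hcast : ((m+1 : Nat) : Int) + 1 = ((m : Int) + 1) + 1 := by push_cast; ring
    rw [hcast, PySem.List.pyRange_one_succ_right (by exact_mod_cast Nat.le_of_lt (by omega)),
        List.foldl_append, hst]
    simp only [List.foldl_cons, List.foldl_nil]
    unfold stepB
    simp only
    have hfib : fib (m-1) + fib m = fib (m+1) := (fib_succ m (by omega)).symm
    set L := Nat.size (fib m).toNat with hL
    set M := Nat.size (fib (m+1)).toNat with hM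
    have hmono : fib m ≤ fib (m+1) := by
      rw [← hfib]
      have := fib_nonneg (m-1)
      omega
    have hML : L ≤ M := by
      apply Nat.size_le_size
      omega
    have hmax : max L M = M := by omega
    rw [hfib, crossLoop_eq _ _ M L (by omega) cross, hmax]
    refine ⟨cross ++ List.replicate (M - L) ((m:Int)+1), ?_, ?_, ?_⟩
    · have : (m + 1 : Nat) - 1 = m := by omega
      rw [this]
    · simp only [List.length_append, List.length_replicate]
      omega
    · rw [S_succ m (by omega), ← hsum]
      simp only [List.length_append, List.length_replicate, List.sum_append,
                 List.sum_replicate, nsmul_eq_mul, hlen]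
      push_cast [Nat.cast_sub hML]
      ring

-- ===== VERDICT (by name: the statement is the Claim_ definition above) =====
theorem fibo_3_bits_spec : Claim_equal_fibo_3_bits := by
  intro n _
  unfold Spec_fibo_3_bits fibo_3_bits fibo_3_bits_alt
  by_cases hn : n ≤ 0
  · simp [hn]
  · rw [if_neg hn, if_neg hn]
    obtain ⟨m, rfl⟩ : ∃ m : Nat, ((m : Nat) : Int) = n := ⟨n.toNat, by omega⟩
    have hm1 : 1 ≤ m := by omega
    by_cases hm2 : 2 ≤ m
    · obtain ⟨cross, hst, hlen, hsum⟩ := loopB m hm2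
      rw [loopA m hm1, hst]
      simp only
      have : cross.foldl (fun (acc : Int) k => acc + ((m:Int) + 1 - k)) 0
          = 0 + ((m:Int)+1) * cross.length - cross.sum := foldl_sub_sum ((m:Int)+1) cross 0
      rw [this]
      rw [zero_add] at *
      rw [hsum]
    · have hm : m = 1 := by omega
      subst hm
      rw [loopA 1 (by omega)]
      rw [show ((1:Nat):Int) + 1 = (2:Int) from by norm_num,
          PySem.List.pyRange_one_eq_nil (by norm_num)]
      simp [fib, S]
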